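-- pv_equiv track=rewrite | github.com/JorgeTordecilla/BudgetBuddy | tools/validate_openapi.py | _validate_problem_catalog
-- ===== SOURCE A (Python) =====
-- CANONICAL_ERROR_STATUSES = {"400", "401", "403", "406", "409", "429"}
--
-- def _validate_problem_catalog(spec: dict) -> list[str]:
--     errors: list[str] = []
--     catalog = spec.get("components", {}).get("x-problem-details-catalog", [])
--     statuses = {str(item.get("status")) for item in catalog if isinstance(item, dict)}
--     missing = sorted(CANONICAL_ERROR_STATUSES - statuses)
--     if missing:
--         errors.append(f"problem catalog missing canonical statuses: {', '.join(missing)}")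
--     return errors
-- ===== SOURCE B (Python) =====
-- CANONICAL_ERROR_STATUSES = {"400", "401", "403", "406", "409", "429"}
--
-- def _validate_problem_catalog(spec: dict) -> list[str]:
--     catalog = spec.get("components", {}).get("x-problem-details-catalog", [])
--     # worklist elimination: one pass over the catalog, crossing off seen statuses
--     missing = ["400", "401", "403", "406", "409", "429"]
--     for item in catalog:
--         if not missing:
--             break
--         if isinstance(item, dict):
--             s = str(item.get("status"))
--             if s in missing:
--                 missing.remove(s)
--     if missing:
--         return ["problem catalog missing canonical statuses: " + ", ".join(missing)]
--     return []
-- ===== Notes on version B (the rewrite author's own statement) =====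
-- stated objective: alternative
-- what changed: B replaces A's build-a-status-set / set-subtract / sort pipeline with a worklist elimination: one pass over the catalog crosses seen statuses off a pre-sorted worklist (with early exit once empty), and what survives is the missing list.
import Mathlib
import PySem

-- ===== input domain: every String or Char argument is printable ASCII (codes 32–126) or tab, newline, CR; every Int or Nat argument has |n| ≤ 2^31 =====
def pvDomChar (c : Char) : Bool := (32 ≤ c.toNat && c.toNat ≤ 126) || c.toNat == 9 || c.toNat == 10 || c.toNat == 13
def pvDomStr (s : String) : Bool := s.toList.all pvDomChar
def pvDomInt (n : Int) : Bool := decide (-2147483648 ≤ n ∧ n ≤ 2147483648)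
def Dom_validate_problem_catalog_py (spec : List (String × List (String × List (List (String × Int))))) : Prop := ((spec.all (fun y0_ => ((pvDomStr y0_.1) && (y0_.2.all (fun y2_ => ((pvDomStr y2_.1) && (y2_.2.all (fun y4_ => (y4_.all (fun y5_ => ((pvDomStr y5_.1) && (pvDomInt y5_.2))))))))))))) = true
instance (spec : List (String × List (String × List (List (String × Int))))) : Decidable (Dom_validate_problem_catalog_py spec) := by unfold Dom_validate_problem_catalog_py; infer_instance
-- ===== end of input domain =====

-- B replaces A's build-a-set / set-subtract / sort pipeline with a worklist elimination:
-- one pass over the catalog crosses seen statuses off a pre-sorted worklist (objective: alternative).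

-- str(item.get("status")): first-match lookup in the item dict; str(None) = "None", str of an int via PySem.Int.toStr
def pvStatusStr (item : List (String × Int)) : String :=
  match (PySem.Dict.mk item).get? "status" with
  | none => "None"
  | some v => PySem.Int.toStr v

-- ===== PORT A =====
def validate_problem_catalog_py (spec : List (String × List (String × List (List (String × Int))))) : List String :=
  let errors : List String := []
  -- spec.get("components", {}).get("x-problem-details-catalog", [])
  let catalog := (PySem.Dict.mk ((PySem.Dict.mk spec).getD "components" [])).getD "x-problem-details-catalog" []
  -- {str(item.get("status")) for item in catalog if isinstance(item, dict)} (isinstance is always true at this type)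
  let statuses : PySem.Set String := PySem.Set.ofList (catalog.map pvStatusStr)
  let missing := PySem.List.sorted (PySem.Set.diff (PySem.Set.ofList ["400", "401", "403", "406", "409", "429"]) statuses) (fun x => x) false
  if missing ≠ [] then errors ++ ["problem catalog missing canonical statuses: " ++ PySem.Str.join ", " missing] else errors

-- ===== PORT B =====
-- B's loop: for item in catalog: break if worklist empty; cross off str(item.get("status")) if present
def pvEliminate (missing : List String) (catalog : List (List (String × Int))) : List String :=
  match catalog with
  | [] => missing
  | item :: rest =>
    if missing = [] then missing
    else
      let s := pvStatusStr item
      if missing.contains s then pvEliminate (missing.erase s) rest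
      else pvEliminate missing rest

def validate_problem_catalog_py_alt (spec : List (String × List (String × List (List (String × Int))))) : List String :=
  let catalog := (PySem.Dict.mk ((PySem.Dict.mk spec).getD "components" [])).getD "x-problem-details-catalog" []
  let missing := pvEliminate ["400", "401", "403", "406", "409", "429"] catalog
  if missing ≠ [] then ["problem catalog missing canonical statuses: " ++ PySem.Str.join ", " missing] else []

-- ===== PRECONDITION & SPEC =====
def Spec_validate_problem_catalog_py (spec : List (String × List (String × List (List (String × Int))))) (out : List String) : Prop := out = validate_problem_catalog_py_alt spec
instance (spec : List (String × List (String × List (List (String × Int))))) (out : List String) : Decidable (Spec_validate_problem_catalog_py spec out) := by unfold Spec_validate_problem_catalog_py; infer_instance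

-- ===== CLAIM (what is proved, stated in full; the proofs are below) =====
def Claim_equal_validate_problem_catalog_py : Prop := ∀ (spec : List (String × List (String × List (List (String × Int))))), Dom_validate_problem_catalog_py spec → Spec_validate_problem_catalog_py spec (validate_problem_catalog_py spec)

-- ===== LEMMAS AND PROOFS =====

-- the canonical list is pairwise ≤ (string order = lexicographic order on the character lists)
theorem pvLitPairwise : List.Pairwise (fun a b : String => a ≤ b) ["400", "401", "403", "406", "409", "429"] := by
  have h : List.Pairwise (fun a b : List Char => a ≤ b)
      ((["400", "401", "403", "406", "409", "429"] : List String).map String.toList) := by decide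
  exact (List.pairwise_map.mp h).imp (fun hab => String.le_iff_toList_le.mpr hab)

-- A's set of seen statuses contains s iff the catalog contains an item with status string s
theorem pvContainsEqAny (catalog : List (List (String × Int))) (s : String) :
    PySem.Set.contains (PySem.Set.ofList (catalog.map pvStatusStr)) s
      = catalog.any (fun item => pvStatusStr item == s) := by
  rw [Bool.eq_iff_iff, PySem.Set.contains_iff, PySem.Set.mem_ofList, List.any_eq_true]
  simp only [List.mem_map, beq_iff_eq]

-- B's worklist elimination, on a duplicate-free worklist, keeps exactly the statuses the catalog never shows
theorem pvEliminateEqFilter (catalog : List (List (String × Int))) (L : List String) (hL : L.Nodup) :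
    pvEliminate L catalog = L.filter (fun s => ! catalog.any (fun item => pvStatusStr item == s)) := by
  induction catalog generalizing L with
  | nil => simp [pvEliminate]
  | cons item rest ih =>
    rw [pvEliminate]
    by_cases hemp : L = []
    · subst hemp; simp
    · simp only [if_neg hemp]
      have hstep : (if L.contains (pvStatusStr item) then L.erase (pvStatusStr item) else L)
          = L.filter (fun x => ! (pvStatusStr item == x)) := by
        split_ifs with hc
        · rw [hL.erase_eq_filter]
          exact List.filter_congr (fun x _ => by simp only [bne]; by_cases h : x = pvStatusStr item <;> simp [h, Ne.symm])
        · symm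
          refine List.filter_eq_self.mpr (fun x hx => ?_)
          have hne : pvStatusStr item ≠ x := fun h => hc (List.contains_iff_mem.mpr (h ▸ hx))
          simp [hne]
      have hgoal : (if L.contains (pvStatusStr item) then pvEliminate (L.erase (pvStatusStr item)) rest
          else pvEliminate L rest)
          = pvEliminate (if L.contains (pvStatusStr item) then L.erase (pvStatusStr item) else L) rest := by
        split_ifs <;> rfl
      rw [hgoal, hstep, ih _ (hL.filter _), List.filter_filter]
      refine List.filter_congr (fun x _ => ?_)
      simp [List.any_cons, Bool.and_comm]

-- A's missing list equals B's missing list, for any catalog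
theorem pvMissingEq (catalog : List (List (String × Int))) :
    PySem.List.sorted (PySem.Set.diff (PySem.Set.ofList ["400", "401", "403", "406", "409", "429"])
        (PySem.Set.ofList (catalog.map pvStatusStr))) (fun x => x) false
      = pvEliminate ["400", "401", "403", "406", "409", "429"] catalog := by
  have hofList : PySem.Set.ofList (["400", "401", "403", "406", "409", "429"] : List String)
      = ["400", "401", "403", "406", "409", "429"] := by decide
  have hdiff : PySem.Set.diff (PySem.Set.ofList ["400", "401", "403", "406", "409", "429"])
      (PySem.Set.ofList (catalog.map pvStatusStr))
      = (["400", "401", "403", "406", "409", "429"] : List String).filter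
          (fun s => ! catalog.any (fun item => pvStatusStr item == s)) := by
    rw [show PySem.Set.diff (PySem.Set.ofList ["400", "401", "403", "406", "409", "429"])
        (PySem.Set.ofList (catalog.map pvStatusStr))
        = (PySem.Set.ofList ["400", "401", "403", "406", "409", "429"]).filter
            (fun x => ! PySem.Set.contains (PySem.Set.ofList (catalog.map pvStatusStr)) x) from rfl,
      hofList]
    exact List.filter_congr (fun x _ => by rw [pvContainsEqAny])
  rw [hdiff, pvEliminateEqFilter catalog _ (by decide)]
  exact PySem.List.sorted_eq_self_of_pairwise _ (fun x : String => x) (pvLitPairwise.filter _)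

-- ===== VERDICT (by name: the statement is the Claim_ definition above) =====
theorem validate_problem_catalog_py_spec : Claim_equal_validate_problem_catalog_py := by
  intro spec _
  unfold Spec_validate_problem_catalog_py validate_problem_catalog_py validate_problem_catalog_py_alt
  simp only [List.nil_append, pvMissingEq]
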